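-- pv_equiv track=rewrite | github.com/adam-berlak/REL-Studios-Music-Robot | theory/utilities.py | binary_to_scale_steps
-- ===== SOURCE A (Python) =====
-- def binary_to_scale_steps(p_binary):
--     binary = p_binary[len(p_binary)::-1]
--     binary = (binary + binary[0])[1:]
--     scale_steps = []
--     semitones = 0
--
--     for i in range(len(binary)):
--         if binary[i] == '0':
--             semitones += 1
--         else:
--             semitones += 1
--             scale_steps.append(semitones)
--             semitones = 0
--
--     return scale_steps
-- ===== SOURCE B (Python) =====
-- def binary_to_scale_steps(p_binary):
--     binary = p_binary[len(p_binary)::-1]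
--     binary = (binary + binary[0])[1:]
--     idx = [i for i, c in enumerate(binary) if c != '0']
--     if not idx:
--         return []
--     return [idx[0] + 1] + [b - a for a, b in zip(idx, idx[1:])]
-- ===== Notes on version B (the rewrite author's own statement) =====
-- stated objective: alternative
-- what changed: Keeps the reverse+rotate preprocessing but replaces the stateful semitone-accumulator/reset loop with building the list of positions of non-'0' characters and taking successive differences (first position + 1, then zip-adjacent differences).
import Mathlib
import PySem

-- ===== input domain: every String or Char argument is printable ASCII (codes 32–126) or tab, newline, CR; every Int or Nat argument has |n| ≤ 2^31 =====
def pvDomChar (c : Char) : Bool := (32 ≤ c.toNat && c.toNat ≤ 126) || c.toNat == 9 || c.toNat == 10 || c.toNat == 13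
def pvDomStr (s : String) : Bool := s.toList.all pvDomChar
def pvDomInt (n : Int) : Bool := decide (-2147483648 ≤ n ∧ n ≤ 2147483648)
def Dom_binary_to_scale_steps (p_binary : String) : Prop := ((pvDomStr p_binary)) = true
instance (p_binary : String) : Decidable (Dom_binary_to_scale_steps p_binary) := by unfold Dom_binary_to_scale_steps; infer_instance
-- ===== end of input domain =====

-- B keeps A's reverse+rotate preprocessing but replaces the stateful accumulator/reset
-- loop by a positions-of-non-'0'-characters list followed by successive differences
-- (objective: alternative decomposition, same complexity).

-- ===== PORT A =====
def binary_to_scale_steps (p_binary : String) : List Int :=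
  let l := p_binary.toList
  match PySem.Chars.slice? l (some (l.length : Int)) none (-1) with   -- p_binary[len(p_binary)::-1]
  | none => []                                                        -- unreachable: step = -1 ≠ 0
  | some rev =>
    match PySem.List.pyGet? rev 0 with                                -- binary[0]; none = IndexError (empty input), outside Pre_
    | none => []
    | some c0 =>
      let binary := PySem.List.slice (rev ++ [c0]) (some 1) none      -- (binary + binary[0])[1:]
      let r := (PySem.List.pyRange 0 (binary.length : Int) 1).foldl   -- for i in range(len(binary)):
        (fun (st : List Int × Int) i =>
          -- binary[i]: i is always in range here, so the default ' ' is never read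
          if PySem.List.pyGetD binary i ' ' == '0' then (st.1, st.2 + 1)
          else (st.1 ++ [st.2 + 1], 0)) ([], 0)
      r.1

-- ===== PORT B =====
def binary_to_scale_steps_alt (p_binary : String) : List Int :=
  let l := p_binary.toList
  match PySem.Chars.slice? l (some (l.length : Int)) none (-1) with   -- p_binary[len(p_binary)::-1]
  | none => []                                                        -- unreachable: step = -1 ≠ 0
  | some rev =>
    match PySem.List.pyGet? rev 0 with                                -- binary[0]; none = IndexError (empty input), outside Pre_
    | none => []
    | some c0 =>
      let binary := PySem.List.slice (rev ++ [c0]) (some 1) none      -- (binary + binary[0])[1:]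
      let idx : List Int :=
        ((PySem.List.enumerate binary 0).filter (fun p => p.2 != '0')).map (fun p => p.1)
      match idx with
      | [] => []
      | i0 :: _ => (i0 + 1) :: (idx.zip idx.tail).map (fun ab => ab.2 - ab.1)

-- ===== PRECONDITION & SPEC =====
-- Pre_ excludes only the empty string, on which A raises IndexError at binary[0] (B raises there too).
def Pre_binary_to_scale_steps (p_binary : String) : Prop := p_binary ≠ ""
instance (p_binary : String) : Decidable (Pre_binary_to_scale_steps p_binary) := by unfold Pre_binary_to_scale_steps; infer_instance
def pvWitness_binary_to_scale_steps : String := "101011010101"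
def Spec_binary_to_scale_steps (p_binary : String) (out : List Int) : Prop := out = binary_to_scale_steps_alt p_binary
instance (p_binary : String) (out : List Int) : Decidable (Spec_binary_to_scale_steps p_binary out) := by unfold Spec_binary_to_scale_steps; infer_instance

-- ===== CLAIM (what is proved, stated in full; the proofs are below) =====
def Claim_equal_binary_to_scale_steps : Prop := ∀ (p_binary : String), Dom_binary_to_scale_steps p_binary → Pre_binary_to_scale_steps p_binary → Spec_binary_to_scale_steps p_binary (binary_to_scale_steps p_binary)

-- ===== LEMMAS AND PROOFS =====

-- A's loop as a structural recursion (semitone accumulator s).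
def goA : List Char → Int → List Int
  | [], _ => []
  | c :: t, s => if c == '0' then goA t (s + 1) else (s + 1) :: goA t 0

-- successive differences, with p the previous position
def diffs : List Int → Int → List Int
  | [], _ => []
  | i :: t, p => (i - p) :: diffs t i

theorem goA_cons (c : Char) (t : List Char) (s : Int) :
    goA (c :: t) s = if c == '0' then goA t (s + 1) else (s + 1) :: goA t 0 := rfl

theorem diffs_cons (i : Int) (t : List Int) (p : Int) :
    diffs (i :: t) p = (i - p) :: diffs t i := rfl

theorem foldlA_eq_goA (bs : List Char) (acc : List Int) (s : Int) :
    (bs.foldl (fun (st : List Int × Int) c =>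
      if c == '0' then (st.1, st.2 + 1) else (st.1 ++ [st.2 + 1], 0)) (acc, s)).1
      = acc ++ goA bs s := by
  induction bs generalizing acc s with
  | nil => simp [goA]
  | cons c t ih =>
    rw [List.foldl_cons]
    by_cases h : c = '0'
    · simp only [goA, h, beq_self_eq_true, if_true]
      exact ih acc (s + 1)
    · have hb : (c == '0') = false := by simpa using h
      simp only [goA, hb, Bool.false_eq_true, if_false]
      rw [ih (acc ++ [s + 1]) 0, List.append_assoc]
      rfl

theorem idxF_cons (c : Char) (t : List Char) (b : Int) :
    ((PySem.List.enumerate (c :: t) b).filter (fun p => p.2 != '0')).map (fun p => p.1)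
      = (if c = '0' then [] else [b]) ++
        ((PySem.List.enumerate t (b + 1)).filter (fun p => p.2 != '0')).map (fun p => p.1) := by
  by_cases h : c = '0' <;> simp [PySem.List.enumerate_cons, h]

theorem goA_eq_diffs (bs : List Char) (b s : Int) :
    goA bs s = diffs (((PySem.List.enumerate bs b).filter (fun p => p.2 != '0')).map (fun p => p.1)) (b - s - 1) := by
  induction bs generalizing b s with
  | nil => simp [goA, PySem.List.enumerate_nil, diffs]
  | cons c t ih =>
    rw [idxF_cons, goA_cons]
    by_cases h : c = '0'
    · rw [if_pos (by simpa using h), if_pos h, List.nil_append, ih (b + 1) (s + 1)]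
      congr 1; ring
    · rw [if_neg (by simpa using h), if_neg h, List.cons_append, List.nil_append, diffs_cons,
        ih (b + 1) 0, show b - (b - s - 1) = s + 1 from by ring,
        show (b : Int) + 1 - 0 - 1 = b from by ring]

theorem diffs_eq_zip (idx : List Int) (p : Int) :
    diffs idx p = match idx with
      | [] => []
      | i0 :: _ => (i0 - p) :: (idx.zip idx.tail).map (fun ab => ab.2 - ab.1) := by
  induction idx generalizing p with
  | nil => simp [diffs]
  | cons i0 t ih =>
    simp only [diffs]
    cases t with
    | nil => simp [diffs]
    | cons i1 t' => rw [ih i0]; simp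

theorem core_eq (bs : List Char) :
    (bs.foldl (fun (st : List Int × Int) c =>
      if c == '0' then (st.1, st.2 + 1) else (st.1 ++ [st.2 + 1], 0)) ([], 0)).1
      = (match ((PySem.List.enumerate bs 0).filter (fun p => p.2 != '0')).map (fun p => p.1) with
        | [] => ([] : List Int)
        | i0 :: _ => (i0 + 1) ::
            ((((PySem.List.enumerate bs 0).filter (fun p => p.2 != '0')).map (fun p => p.1)).zip
             (((PySem.List.enumerate bs 0).filter (fun p => p.2 != '0')).map (fun p => p.1)).tail).map
              (fun ab => ab.2 - ab.1)) := by
  rw [foldlA_eq_goA, List.nil_append, goA_eq_diffs bs 0 0, diffs_eq_zip]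
  cases ((PySem.List.enumerate bs 0).filter (fun p => p.2 != '0')).map (fun p => p.1) with
  | nil => rfl
  | cons i0 t => norm_num

theorem slice?_len_rev (l : List Char) :
    PySem.List.slice? l (some (l.length : Int)) none (-1) = some l.reverse := by
  have h := PySem.List.slice?_none_none_neg_one (xs := l)
  unfold PySem.List.slice? at h ⊢
  unfold PySem.List.sliceIndices at h ⊢
  simp at h ⊢
  split_ifs with h1 <;> split_ifs at h <;> simp_all <;> try omega

-- ===== VERDICT (by name: the statement is the Claim_ definition above) =====
theorem binary_to_scale_steps_spec : Claim_equal_binary_to_scale_steps := by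
  intro p _ _
  unfold Spec_binary_to_scale_steps binary_to_scale_steps binary_to_scale_steps_alt
  simp only [PySem.Chars.slice?_eq_listSlice?, slice?_len_rev]
  cases hg : PySem.List.pyGet? p.toList.reverse 0 with
  | none => rfl
  | some c0 =>
    simp only
    rw [PySem.List.foldl_pyRange_zero_pyGetD'
      (PySem.List.slice (p.toList.reverse ++ [c0]) (some 1)) ' '
      (fun (st : List Int × Int) c =>
        if c == '0' then (st.1, st.2 + 1) else (st.1 ++ [st.2 + 1], 0)) ([], 0)]
    exact core_eq _
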